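-- pv_equiv track=rewrite | github.com/coddington/let-s-kick-now | String/debug.py | coP
-- ===== SOURCE A (Python) =====
-- def coP(inp):
--   n = inp
--   palin = inp
--   n = n//10
--   while n > 0:
--     palin = palin*10+(n%10)
--     n = n//10
--   return palin;
-- ===== SOURCE B (Python) =====
-- def coP(inp):
--   if inp <= 0:
--     return inp
--   ds = []
--   n = inp
--   while n > 0:
--     ds.append(n % 10)
--     n //= 10
--   out = 0
--   for d in ds[::-1] + ds[1:]:
--     out = out * 10 + d
--   return out
-- ===== Notes on version B (the rewrite author's own statement) =====
-- stated objective: alternative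
-- what changed: B extracts the LSB-first digit list of inp once, forms the full palindromic digit sequence (reversed digit list followed by its tail) and evaluates that sequence from zero, instead of A's interleaved divide-and-accumulate loop onto the running number.
import Mathlib
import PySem

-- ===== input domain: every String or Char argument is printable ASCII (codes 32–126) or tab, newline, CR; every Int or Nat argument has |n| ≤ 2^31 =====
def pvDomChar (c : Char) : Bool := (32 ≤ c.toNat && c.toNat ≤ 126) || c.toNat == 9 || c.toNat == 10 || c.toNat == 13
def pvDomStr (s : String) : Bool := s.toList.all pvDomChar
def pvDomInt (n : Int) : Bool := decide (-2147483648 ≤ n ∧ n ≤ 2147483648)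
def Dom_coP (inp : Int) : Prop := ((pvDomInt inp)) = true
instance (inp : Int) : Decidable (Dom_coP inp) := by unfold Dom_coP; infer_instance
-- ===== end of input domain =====

-- B builds the LSB-first digit list of inp once, forms the palindromic digit sequence
-- (reversed list ++ its tail) and evaluates it from zero, instead of A's interleaved
-- divide-and-accumulate loop (alternative decomposition, same cost).


-- ===== PORT A =====
-- the while loop: while n > 0: palin = palin*10 + n%10; n = n//10
def coPLoop (n palin : Int) : Int :=
  if _h : n > 0 then coPLoop (PySem.Int.floordiv n 10) (palin * 10 + PySem.Int.mod n 10)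
  else palin
termination_by n.toNat
decreasing_by simp [PySem.Int.floordiv, Int.fdiv_eq_ediv]; omega

def coP (inp : Int) : Int :=
  coPLoop (PySem.Int.floordiv inp 10) inp

-- ===== PORT B =====
-- the digit-collection loop: while n > 0: ds.append(n % 10); n //= 10
def coPDigits (n : Int) (ds : List Int) : List Int :=
  if _h : n > 0 then coPDigits (PySem.Int.floordiv n 10) (ds ++ [PySem.Int.mod n 10])
  else ds
termination_by n.toNat
decreasing_by simp [PySem.Int.floordiv, Int.fdiv_eq_ediv]; omega

def coP_alt (inp : Int) : Int :=
  if inp ≤ 0 then inp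
  else
    let ds := coPDigits inp []
    -- ds[::-1] : slice? with step -1 is always `some` (step ≠ 0), so getD is exact here
    (((PySem.List.slice? ds none none (-1)).getD []) ++ PySem.List.slice ds (some 1) none).foldl
      (fun out d => out * 10 + d) 0

-- ===== PRECONDITION & SPEC =====
def Spec_coP (inp : Int) (out : Int) : Prop := out = coP_alt inp
instance (inp : Int) (out : Int) : Decidable (Spec_coP inp out) := by unfold Spec_coP; infer_instance

-- ===== CLAIM (what is proved, stated in full; the proofs are below) =====
def Claim_equal_coP : Prop := ∀ (inp : Int), Dom_coP inp → Spec_coP inp (coP inp)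

-- ===== LEMMAS AND PROOFS =====

theorem coPDigits_nonpos (n : Int) (ds : List Int) (h : ¬ n > 0) : coPDigits n ds = ds := by
  rw [coPDigits]; simp [h]

theorem coPDigits_acc (n : Int) (ds : List Int) :
    coPDigits n ds = ds ++ coPDigits n [] := by
  induction hk : n.toNat using Nat.strong_induction_on generalizing n ds with
  | _ k ih =>
    by_cases h : n > 0
    · conv_lhs => rw [coPDigits]
      conv_rhs => rw [coPDigits]
      simp only [h, dite_true]
      rw [ih (PySem.Int.floordiv n 10).toNat
            (by simp [PySem.Int.floordiv, Int.fdiv_eq_ediv] at *; omega) _ _ rfl,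
          ih (PySem.Int.floordiv n 10).toNat
            (by simp [PySem.Int.floordiv, Int.fdiv_eq_ediv] at *; omega)
            (PySem.Int.floordiv n 10) ([] ++ [PySem.Int.mod n 10]) rfl]
      simp
    · rw [coPDigits_nonpos _ _ h, coPDigits_nonpos _ _ h]; simp

theorem coPDigits_pos (n : Int) (h : n > 0) :
    coPDigits n [] = PySem.Int.mod n 10 :: coPDigits (PySem.Int.floordiv n 10) [] := by
  rw [coPDigits]
  simp only [h, dite_true]
  rw [coPDigits_acc]
  simp

-- A's loop is the fold of (a*10+d) over the LSB-first digit list of n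
theorem coPLoop_eq_foldl (n p : Int) :
    coPLoop n p = (coPDigits n []).foldl (fun a d => a * 10 + d) p := by
  induction hk : n.toNat using Nat.strong_induction_on generalizing n p with
  | _ k ih =>
    by_cases h : n > 0
    · rw [coPLoop]
      simp only [h, dite_true]
      rw [coPDigits_pos n h, List.foldl_cons,
          ih (PySem.Int.floordiv n 10).toNat
            (by simp [PySem.Int.floordiv, Int.fdiv_eq_ediv] at *; omega) _ _ rfl]
    · rw [coPLoop, coPDigits_nonpos _ _ h]; simp [h]

-- folding over the reversed LSB digit list reconstructs n
theorem coPDigits_recon (n : Int) (hn : 0 ≤ n) (a : Int) :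
    (coPDigits n []).reverse.foldl (fun a d => a * 10 + d) a
      = a * 10 ^ (coPDigits n []).length + n := by
  induction hk : n.toNat using Nat.strong_induction_on generalizing n a with
  | _ k ih =>
    by_cases h : n > 0
    · rw [coPDigits_pos n h]
      simp only [List.reverse_cons, List.foldl_append, List.foldl_cons, List.foldl_nil,
        List.length_cons]
      rw [ih (PySem.Int.floordiv n 10).toNat
            (by simp [PySem.Int.floordiv, Int.fdiv_eq_ediv] at *; omega) _
            (by simp [PySem.Int.floordiv, Int.fdiv_eq_ediv]; omega) _ rfl]
      have hsplit : 10 * PySem.Int.floordiv n 10 + PySem.Int.mod n 10 = n := by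
        simp [PySem.Int.floordiv, PySem.Int.mod, Int.fdiv_eq_ediv, Int.fmod_eq_emod]; omega
      ring_nf
      ring_nf at hsplit ⊢
      omega
    · rw [coPDigits_nonpos _ _ h]
      simp
      omega

theorem floordiv_nonpos (n : Int) (h : n ≤ 0) : PySem.Int.floordiv n 10 ≤ 0 := by
  simp [PySem.Int.floordiv, Int.fdiv_eq_ediv]; omega

-- ===== VERDICT (by name: the statement is the Claim_ definition above) =====
theorem coP_spec : Claim_equal_coP := by
  intro inp _
  unfold Spec_coP coP coP_alt
  by_cases h : inp ≤ 0
  · rw [coPLoop_eq_foldl, coPDigits_nonpos _ _ (by have := floordiv_nonpos inp h; omega)]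
    simp [h]
  · simp only [h, if_false]
    rw [PySem.List.slice?_none_none_neg_one, PySem.List.slice_from_one]
    simp only [Option.getD_some]
    rw [coPDigits_pos inp (by omega), List.tail_cons, List.reverse_cons, List.foldl_append,
        List.foldl_append]
    rw [coPLoop_eq_foldl]
    congr 1
    have h1 := coPDigits_recon (PySem.Int.floordiv inp 10)
      (by simp [PySem.Int.floordiv, Int.fdiv_eq_ediv]; omega) 0
    have hsplit : 10 * PySem.Int.floordiv inp 10 + PySem.Int.mod inp 10 = inp := by
      simp [PySem.Int.floordiv, PySem.Int.mod, Int.fdiv_eq_ediv, Int.fmod_eq_emod]; omega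
    simp only [h1, List.foldl_cons, List.foldl_nil]
    omega
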